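-- pv_equiv track=rewrite | github.com/Colletotrichum1/GOAT | orthoFinder_downstream.py | copyNumberOnCoreChrom
-- ===== SOURCE A (Python) =====
-- def copyNumberOnCoreChrom(geneID:list, ortho_dict:dict) -> dict:
-- 	"""
-- 	:param geneID: Accessory chromosomes' gene id list
-- 	:param ortho_dict: Dict from Orthogroups.txt file
-- 	:return:
-- 	"""
-- 	strain_prefix = geneID[0][0:5]
-- 	res = {}
-- 	for gene in geneID:
-- 		for og in ortho_dict:
-- 			og_geneList = ortho_dict[og]
-- 			if gene in og_geneList:
-- 				sub_ogList = [i for i in og_geneList if i[0:5] == strain_prefix]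
-- 				geneOnCoreChrom = [i for i in sub_ogList if i not in geneID]
-- 				res[gene] = len(geneOnCoreChrom)
-- 				break
-- 	return res
-- ===== SOURCE B (Python) =====
-- def copyNumberOnCoreChrom(geneID: list, ortho_dict: dict) -> dict:
--     """One pass over ortho_dict building a gene->count index, then emit in geneID order."""
--     strain_prefix = geneID[0][0:5]
--     gset = set(geneID)
--     counts = {}
--     for og_geneList in ortho_dict.values():
--         c = sum(1 for i in og_geneList if i[0:5] == strain_prefix and i not in gset)
--         for i in og_geneList:
--             if i in gset and i not in counts:
--                 counts[i] = c
--     return {g: counts[g] for g in geneID if g in counts}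
-- ===== Notes on version B (the rewrite author's own statement) =====
-- stated objective: faster
-- what changed: A rescans the whole ortho_dict for every gene (and re-filters the orthogroup per gene); B makes a single pass over ortho_dict, computing each orthogroup's core-chromosome count once and indexing it by gene (first orthogroup wins), then emits results in geneID order.
import Mathlib
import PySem

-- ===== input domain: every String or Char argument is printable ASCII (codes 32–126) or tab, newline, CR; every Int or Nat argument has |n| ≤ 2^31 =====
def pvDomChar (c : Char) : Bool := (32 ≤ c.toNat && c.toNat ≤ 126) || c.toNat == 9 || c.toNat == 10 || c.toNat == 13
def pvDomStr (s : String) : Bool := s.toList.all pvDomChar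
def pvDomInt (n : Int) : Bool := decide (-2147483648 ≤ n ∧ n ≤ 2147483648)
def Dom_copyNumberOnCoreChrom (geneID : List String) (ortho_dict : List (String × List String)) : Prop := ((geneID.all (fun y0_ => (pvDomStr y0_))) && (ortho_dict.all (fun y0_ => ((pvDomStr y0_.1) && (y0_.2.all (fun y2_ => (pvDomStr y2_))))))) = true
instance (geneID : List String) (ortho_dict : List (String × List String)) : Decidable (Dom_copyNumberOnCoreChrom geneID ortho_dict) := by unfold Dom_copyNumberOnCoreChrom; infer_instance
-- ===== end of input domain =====

-- B replaces A's per-gene rescan of every orthogroup by a single pass over ortho_dict that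
-- builds a gene->count index once, then emits the results in geneID order (objective: faster).


-- ===== PORT A =====
-- A's inner 'for og in ortho_dict: … break': first orthogroup gene-list containing gene
def pvFindOg (gene : String) : List (String × List String) → Option (List String)
  | [] => none
  | (_, og_geneList) :: rest =>
      if og_geneList.contains gene then some og_geneList else pvFindOg gene rest

def copyNumberOnCoreChrom (geneID : List String) (ortho_dict : List (String × List String)) : List (String × Int) :=
  let strain_prefix := PySem.Str.slice (PySem.List.pyGetD geneID 0 "") (some 0) (some 5)
  (geneID.foldl (fun (res : PySem.Dict String Int) gene =>
      match pvFindOg gene ortho_dict with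
      | none => res
      | some og_geneList =>
          let sub_ogList := og_geneList.filter
            (fun i => PySem.Str.slice i (some 0) (some 5) == strain_prefix)
          let geneOnCoreChrom := sub_ogList.filter (fun i => !(geneID.contains i))
          res.insert gene (geneOnCoreChrom.length : Int)
    ) PySem.Dict.empty).items

-- ===== PORT B =====
def copyNumberOnCoreChrom_alt (geneID : List String) (ortho_dict : List (String × List String)) : List (String × Int) :=
  let strain_prefix := PySem.Str.slice (PySem.List.pyGetD geneID 0 "") (some 0) (some 5)
  let gset : PySem.Set String := PySem.Set.ofList geneID
  let counts : PySem.Dict String Int := ortho_dict.foldl (fun counts p =>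
      let c : Int := (p.2.countP (fun i =>
        PySem.Str.slice i (some 0) (some 5) == strain_prefix && !(PySem.Set.contains gset i)) : Int)
      p.2.foldl (fun counts i =>
        if PySem.Set.contains gset i && !(counts.contains i) then counts.insert i c else counts)
        counts
    ) PySem.Dict.empty
  (geneID.foldl (fun (res : PySem.Dict String Int) g =>
      match counts.get? g with
      | some c => res.insert g c
      | none => res) PySem.Dict.empty).items

-- ===== PRECONDITION & SPEC =====
-- Pre_ excludes only geneID = [], on which Python A raises IndexError at geneID[0].
def Pre_copyNumberOnCoreChrom (geneID : List String) (ortho_dict : List (String × List String)) : Prop :=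
  geneID ≠ []
instance (geneID : List String) (ortho_dict : List (String × List String)) : Decidable (Pre_copyNumberOnCoreChrom geneID ortho_dict) := by unfold Pre_copyNumberOnCoreChrom; infer_instance

def pvWitness_copyNumberOnCoreChrom : List String × (List (String × List String)) :=
  (["STR01g1", "STR01g2"], [("OG1", ["STR01g1", "STR01c1", "OTHERg9"]), ("OG2", ["STR01g2"])])

def Spec_copyNumberOnCoreChrom (geneID : List String) (ortho_dict : List (String × List String)) (out : List (String × Int)) : Prop := out = copyNumberOnCoreChrom_alt geneID ortho_dict
instance (geneID : List String) (ortho_dict : List (String × List String)) (out : List (String × Int)) : Decidable (Spec_copyNumberOnCoreChrom geneID ortho_dict out) := by unfold Spec_copyNumberOnCoreChrom; infer_instance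

-- ===== CLAIM (what is proved, stated in full; the proofs are below) =====
def Claim_equal_copyNumberOnCoreChrom : Prop := ∀ (geneID : List String) (ortho_dict : List (String × List String)), Dom_copyNumberOnCoreChrom geneID ortho_dict → Pre_copyNumberOnCoreChrom geneID ortho_dict → Spec_copyNumberOnCoreChrom geneID ortho_dict (copyNumberOnCoreChrom geneID ortho_dict)

-- ===== LEMMAS AND PROOFS =====

-- set(geneID) membership equals the list membership test A performs
theorem pv_set_contains (geneID : List String) (x : String) :
    PySem.Set.contains (PySem.Set.ofList geneID) x = geneID.contains x := by
  simp [PySem.Set.contains_eq_listContains]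

-- A's double filter counts exactly B's conjunctive predicate
theorem pv_count_eq (geneID : List String) (pre : String) (l : List String) :
    (((l.filter (fun i => PySem.Str.slice i (some 0) (some 5) == pre)).filter
        (fun i => !(geneID.contains i))).length : Int)
      = (l.countP (fun i =>
          PySem.Str.slice i (some 0) (some 5) == pre
            && !(PySem.Set.contains (PySem.Set.ofList geneID) i)) : Int) := by
  congr 1
  rw [← List.countP_eq_length_filter, List.countP_filter]
  apply List.countP_congr
  intro a _
  simp [PySem.Set.contains_eq_listContains, PySem.Set.mem_ofList, Bool.and_comm]

-- lookup after B's inner loop (one orthogroup list, constant value c)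
theorem pv_inner_get? (geneID : List String) (l : List String)
    (d : PySem.Dict String Int) (c : Int) (x : String) :
    (l.foldl (fun d i =>
        if PySem.Set.contains (PySem.Set.ofList geneID) i && !(d.contains i)
        then d.insert i c else d) d).get? x
      = if x ∈ geneID ∧ x ∈ l ∧ d.get? x = none then some c else d.get? x := by
  induction l generalizing d with
  | nil => simp
  | cons i l ih =>
    simp only [List.foldl_cons]
    rw [ih]
    by_cases hgi : i ∈ geneID
    · by_cases hdi : d.contains i
      · have hd : d.get? i ≠ none := by
          rw [PySem.Dict.contains_eq_isSome_get?] at hdi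
          exact Option.isSome_iff_ne_none.mp hdi
        simp only [pv_set_contains, List.contains_iff_mem, hgi, hdi]
        simp only [decide_true, Bool.not_true, Bool.and_false, if_false]
        by_cases hxi : x = i
        · subst hxi; simp [hd]
        · simp [List.mem_cons, hxi]
      · have hdi' : d.contains i = false := by simpa using hdi
        have hd : d.get? i = none := by
          rw [PySem.Dict.contains_eq_isSome_get?] at hdi'
          simpa [Option.isSome_iff_ne_none] using hdi'
        have hci : geneID.contains i = true := by
          simpa [List.contains_iff_mem] using hgi
        simp only [pv_set_contains, hci, hdi', Bool.not_false, Bool.and_true, if_true]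
        by_cases hxi : x = i
        · subst hxi
          simp [PySem.Dict.get?_insert_self, hgi, hd]
        · rw [PySem.Dict.get?_insert_of_ne (d := d) (v := c) hxi]
          simp [List.mem_cons, hxi]
    · have hni : ¬ (PySem.Set.contains (PySem.Set.ofList geneID) i && !(d.contains i)) = true := by
        simp [pv_set_contains, List.contains_iff_mem, hgi]
      simp only [hni, if_false]
      by_cases hxi : x = i
      · subst hxi; simp [hgi]
      · simp [List.mem_cons, hxi]

-- lookup after B's outer loop = count from the first orthogroup containing x (A's break)
theorem pv_outer_get? (geneID : List String) (pre : String)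
    (od : List (String × List String)) (d : PySem.Dict String Int) (x : String) :
    (od.foldl (fun counts p =>
        let c : Int := (p.2.countP (fun i =>
          PySem.Str.slice i (some 0) (some 5) == pre
            && !(PySem.Set.contains (PySem.Set.ofList geneID) i)) : Int)
        p.2.foldl (fun counts i =>
          if PySem.Set.contains (PySem.Set.ofList geneID) i && !(counts.contains i)
          then counts.insert i c else counts) counts) d).get? x
      = if x ∈ geneID ∧ d.get? x = none
        then (pvFindOg x od).map (fun l => (l.countP (fun i =>
          PySem.Str.slice i (some 0) (some 5) == pre
            && !(PySem.Set.contains (PySem.Set.ofList geneID) i)) : Int))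
        else d.get? x := by
  induction od generalizing d with
  | nil =>
    simp [pvFindOg]
  | cons p rest ih =>
    simp only [List.foldl_cons]
    rw [ih, pv_inner_get?]
    by_cases hx : x ∈ geneID
    · by_cases hxp : x ∈ p.2
      · have hcont : (p.2).contains x = true := by simpa [List.contains_iff_mem] using hxp
        by_cases hd : d.get? x = none
        · simp [pvFindOg, hx, hxp, hd, hcont]
        · simp [pvFindOg, hx, hxp, hd, hcont]
      · have hcont : (p.2).contains x = false := by simpa [List.contains_iff_mem] using hxp
        simp [pvFindOg, hx, hxp, hcont]
    · simp [pvFindOg, hx]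

-- ===== VERDICT (by name: the statement is the Claim_ definition above) =====
theorem copyNumberOnCoreChrom_spec : Claim_equal_copyNumberOnCoreChrom := by
  intro geneID od _ _
  show copyNumberOnCoreChrom geneID od = copyNumberOnCoreChrom_alt geneID od
  simp only [copyNumberOnCoreChrom, copyNumberOnCoreChrom_alt]
  congr 1
  apply PySem.List.foldl_congr_mem
  intro acc gene hmem
  rw [pv_outer_get?]
  simp only [hmem, PySem.Dict.get?_empty, and_true, if_true]
  cases hfo : pvFindOg gene od with
  | none => simp only [Option.map_none]
  | some l =>
      simp only [Option.map_some]
      exact congrArg (acc.insert gene) (pv_count_eq geneID _ l)
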